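-- pv_equiv track=rewrite | github.com/lzm10214066/actor_image_crawler | douban/processActorUrls.py | processDuplicatedName
-- ===== SOURCE A (Python) =====
-- def processDuplicatedName(actors_ids):
--     a_i_copy = list(actors_ids)
--     c = 0
--     for i in range(1, len(actors_ids)):
--         tmp = actors_ids[i].strip('\n').split('\t')
--         a_i = tmp[0]
--         id = tmp[1]
--         a_p = actors_ids[i - 1].strip('\n').split('\t')[0]
--         if (a_p == a_i):
--             c += 1
--             a_i = a_i + "_" + str(c)
--             a_i_copy[i] = a_i + '\t' + id
--         else:
--             c = 0
--
--     return a_i_copy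
-- ===== SOURCE B (Python) =====
-- def processDuplicatedName(actors_ids):
--     out = []
--     rest = list(actors_ids)
--     while rest:
--         head = rest.pop(0)
--         key = head.strip('\n').split('\t')[0]
--         run = []
--         while rest and rest[0].strip('\n').split('\t')[0] == key:
--             run.append(rest.pop(0))
--         out.append(head)
--         for k, e in enumerate(run, 1):
--             f = e.strip('\n').split('\t')
--             out.append(f[0] + '_' + str(k) + '\t' + f[1])
--     return out
-- ===== Notes on version B (the rewrite author's own statement) =====
-- stated objective: alternative
-- what changed: A walks indices 1..n-1 carrying a counter reset on key change and mutates a copy in place; B is a structural recursion that peels off each maximal run of equal names and rebuilds the output, leaving the run head and suffixing the k-th run member with _k.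
import Mathlib
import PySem

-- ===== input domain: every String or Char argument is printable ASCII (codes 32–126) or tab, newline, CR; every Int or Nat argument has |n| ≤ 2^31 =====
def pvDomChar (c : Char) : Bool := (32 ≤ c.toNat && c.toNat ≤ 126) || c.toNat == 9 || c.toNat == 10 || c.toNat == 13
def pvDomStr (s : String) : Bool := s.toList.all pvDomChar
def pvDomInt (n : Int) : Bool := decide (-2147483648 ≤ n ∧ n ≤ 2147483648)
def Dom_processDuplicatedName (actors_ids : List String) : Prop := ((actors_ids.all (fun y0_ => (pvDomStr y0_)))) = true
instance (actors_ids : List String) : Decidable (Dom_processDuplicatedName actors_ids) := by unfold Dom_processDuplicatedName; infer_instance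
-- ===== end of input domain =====

-- B rewrites A's index loop with a cross-run counter as a structural recursion over maximal
-- runs of equal names (group, keep the run head, suffix the k-th run member with "_k");
-- objective: alternative decomposition, same cost.


-- ===== PORT A =====
-- s.strip('\n').split('\t')  (split? is some because the separator "\t" is non-empty)
def pvFieldsA (s : String) : List String :=
  (PySem.Str.split? (PySem.Str.stripChars s "\n") "\t").getD []

-- literal port of A: a fold over range(1, len(actors_ids)) carrying (a_i_copy, c);
-- tmp[1] is total here via getD (Pre_ excludes the inputs where Python raises IndexError)
def processDuplicatedName (actors_ids : List String) : List String :=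
  ((PySem.List.pyRange 1 (PySem.List.len actors_ids) 1).foldl
    (fun (st : List String × Int) (i : Int) =>
      let tmp := pvFieldsA (PySem.List.pyGetD actors_ids i "")
      let a_i := tmp.getD 0 ""
      let id := tmp.getD 1 ""
      let a_p := (pvFieldsA (PySem.List.pyGetD actors_ids (i - 1) "")).getD 0 ""
      if a_p == a_i then
        let c := st.2 + 1
        (PySem.List.pySetD st.1 i ((a_i ++ "_" ++ PySem.Int.toStr c) ++ "\t" ++ id), c)
      else
        (st.1, 0))
    (actors_ids, 0)).1

-- ===== PORT B =====
-- e.strip('\n').split('\t')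
def pvFieldsB (s : String) : List String :=
  (PySem.Str.split? (PySem.Str.stripChars s "\n") "\t").getD []

-- f[0] + '_' + str(k) + '\t' + f[1]  for the k-th member (k ≥ 1) of a run
def pvSuffixB (ke : Int × String) : String :=
  let f := pvFieldsB ke.2
  (f.getD 0 "" ++ "_" ++ PySem.Int.toStr ke.1) ++ "\t" ++ f.getD 1 ""

-- literal port of B: pop the head, peel off its maximal run (takeWhile/dropWhile = the inner
-- while loop on rest), emit head unchanged and the run members suffixed via enumerate(run, 1)
def processDuplicatedName_alt : List String → List String
  | [] => []
  | head :: rest =>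
    let key := (pvFieldsB head).getD 0 ""
    let run := rest.takeWhile (fun s => (pvFieldsB s).getD 0 "" == key)
    let rest' := rest.dropWhile (fun s => (pvFieldsB s).getD 0 "" == key)
    head :: ((PySem.List.enumerate run 1).map pvSuffixB ++ processDuplicatedName_alt rest')
  termination_by l => l.length
  decreasing_by
    simp only [List.length_cons]
    exact Nat.lt_succ_of_le ((List.dropWhile_sublist _).length_le)

-- ===== PRECONDITION & SPEC =====
-- Pre_ excludes exactly the inputs where Python A raises IndexError: every element at index ≥ 1
-- must contain a tab after stripping newlines (tmp[1] is accessed for every such element).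
def Pre_processDuplicatedName (actors_ids : List String) : Prop :=
  ∀ s ∈ actors_ids.tail, 2 ≤ ((PySem.Str.split? (PySem.Str.stripChars s "\n") "\t").getD []).length
instance (actors_ids : List String) : Decidable (Pre_processDuplicatedName actors_ids) := by
  unfold Pre_processDuplicatedName; infer_instance

def pvWitness_processDuplicatedName : List String := ["fan\t1", "fan\t2\n", "fan\t3", "li\t4"]

def Spec_processDuplicatedName (actors_ids : List String) (out : List String) : Prop := out = processDuplicatedName_alt actors_ids
instance (actors_ids : List String) (out : List String) : Decidable (Spec_processDuplicatedName actors_ids out) := by unfold Spec_processDuplicatedName; infer_instance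

-- ===== CLAIM (what is proved, stated in full; the proofs are below) =====
def Claim_equal_processDuplicatedName : Prop := ∀ (actors_ids : List String), Dom_processDuplicatedName actors_ids → Pre_processDuplicatedName actors_ids → Spec_processDuplicatedName actors_ids (processDuplicatedName actors_ids)

-- ===== LEMMAS AND PROOFS =====

-- the key of an element, shared vocabulary of the proofs
def pvKey (s : String) : String := (pvFieldsA s).getD 0 ""

-- replacement string A writes for the current element x when the counter has just become c
def pvRepl (x : String) (c : Int) : String :=
  ((pvFieldsA x).getD 0 "" ++ "_" ++ PySem.Int.toStr c) ++ "\t" ++ (pvFieldsA x).getD 1 ""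

-- A's loop, rephrased as a structural recursion over the untouched tail:
-- prev is the ORIGINAL previous element, c the running counter
def pvLoopA (prev : String) (c : Int) : List String → List String
  | [] => []
  | x :: xs =>
    if pvKey prev == pvKey x then pvRepl x (c + 1) :: pvLoopA x (c + 1) xs
    else x :: pvLoopA x 0 xs

-- the tail-form both ports reduce to
def pvTailForm : List String → List String
  | [] => []
  | h :: t => h :: pvLoopA h 0 t

-- invariant of A's fold: done is the processed prefix (length ≥ 1), rest the untouched
-- original suffix, prev the original element just before rest
theorem pvA_fold_inv (l : List String) :
    ∀ (rest done : List String) (prev : String) (c : Int),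
      1 ≤ done.length →
      l.drop done.length = rest →
      l.getD (done.length - 1) "" = prev →
      ((PySem.List.pyRange (done.length : Int) (PySem.List.len l) 1).foldl
        (fun (st : List String × Int) (i : Int) =>
          let tmp := pvFieldsA (PySem.List.pyGetD l i "")
          let a_i := tmp.getD 0 ""
          let id := tmp.getD 1 ""
          let a_p := (pvFieldsA (PySem.List.pyGetD l (i - 1) "")).getD 0 ""
          if a_p == a_i then
            let c := st.2 + 1
            (PySem.List.pySetD st.1 i ((a_i ++ "_" ++ PySem.Int.toStr c) ++ "\t" ++ id), c)
          else
            (st.1, 0))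
        (done ++ rest, c)).1 = done ++ pvLoopA prev c rest := by
  intro rest
  induction rest with
  | nil =>
    intro done prev c h1 h2 h3
    have hlen : l.length ≤ done.length := by
      have := List.drop_eq_nil_iff.mp h2; omega
    rw [PySem.List.pyRange_one_eq_nil (by simp [PySem.List.len_eq]; exact_mod_cast hlen)]
    simp [pvLoopA]
  | cons x xs ih =>
    intro done prev c h1 h2 h3
    have hlt : done.length < l.length := by
      by_contra hc
      rw [List.drop_eq_nil_iff.mpr (by omega)] at h2; exact List.cons_ne_nil x xs h2.symm
    have hx : l.getD done.length "" = x := by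
      have hg : (l.drop done.length)[0]? = l[done.length + 0]? := List.getElem?_drop
      rw [h2] at hg
      simp only [List.getElem?_cons_zero, Nat.add_zero] at hg
      simp [List.getD, ← hg]
    have hdrop : l.drop (done.length + 1) = xs := by
      rw [← List.tail_drop, h2]; rfl
    rw [PySem.List.pyRange_one_cons (by simp [PySem.List.len_eq]; exact_mod_cast hlt)]
    rw [List.foldl_cons]
    have hcast : ((done.length : Int) - 1) = ((done.length - 1 : Nat) : Int) := by
      push_cast [h1]; omega
    simp only [PySem.List.pyGetD_natCast, hcast, hx, h3]
    by_cases hk : pvKey prev == pvKey x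
    · have hkey : ((pvFieldsA prev).getD 0 "" == (pvFieldsA x).getD 0 "") = true := hk
      rw [if_pos hkey]
      simp only [PySem.List.pySetD_natCast]
      rw [List.set_append_right _ _ (le_refl _)]
      simp only [Nat.sub_self, List.set_cons_zero]
      have hstep := ih (done ++ [pvRepl x (c + 1)]) x (c + 1)
        (by simp)
        (by simpa using hdrop)
        (by simpa using hx)
      simp only [List.length_append, List.length_cons, List.length_nil, Nat.zero_add,
        List.append_assoc, List.cons_append, List.nil_append] at hstep ⊢
      have hcast2 : ((done.length : Int) + 1) = ((done.length + 1 : Nat) : Int) := by push_cast; ring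
      rw [hcast2]
      rw [show (pvRepl x (c+1)) = (((pvFieldsA x).getD 0 "" ++ "_" ++ PySem.Int.toStr (c+1)) ++ "\t" ++ (pvFieldsA x).getD 1 "") from rfl] at hstep
      rw [hstep]
      have hk' : (pvKey prev == pvKey x) = true := hk
      simp only [pvLoopA, hk', if_pos, pvRepl]
    · have hkey : ((pvFieldsA prev).getD 0 "" == (pvFieldsA x).getD 0 "") = false := by
        simpa [pvKey] using hk
      rw [if_neg (by simp only [hkey]; exact Bool.false_ne_true)]
      have hstep := ih (done ++ [x]) x 0
        (by simp)
        (by simpa using hdrop)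
        (by simpa using hx)
      simp only [List.length_append, List.length_cons, List.length_nil, Nat.zero_add,
        List.append_assoc, List.cons_append, List.nil_append] at hstep ⊢
      have hcast2 : ((done.length : Int) + 1) = ((done.length + 1 : Nat) : Int) := by push_cast; ring
      rw [hcast2, hstep]
      have hk' : (pvKey prev == pvKey x) = false := by simpa using hk
      simp only [pvLoopA, hk', Bool.false_eq_true, if_false]

theorem pvA_eq_tailForm (l : List String) : processDuplicatedName l = pvTailForm l := by
  cases l with
  | nil =>
    unfold processDuplicatedName
    rw [PySem.List.pyRange_one_eq_nil (by simp [PySem.List.len_eq])]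
    rfl
  | cons h t =>
    unfold processDuplicatedName
    have := pvA_fold_inv (h :: t) t [h] h 0 (by simp) (by simp) (by simp)
    simp only [List.length_cons, List.length_nil, Nat.zero_add, List.cons_append,
      List.nil_append, Nat.cast_one] at this
    rw [this]
    rfl

-- pvLoopA splits as: the maximal run with prev's key, suffixed, then the tail-form of the rest
theorem pvLoopA_split (t : List String) : ∀ (prev : String) (c : Int),
    pvLoopA prev c t =
      (PySem.List.enumerate (t.takeWhile (fun s => (pvFieldsB s).getD 0 "" == pvKey prev)) (c + 1)).map pvSuffixB
        ++ pvTailForm (t.dropWhile (fun s => (pvFieldsB s).getD 0 "" == pvKey prev)) := by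
  induction t with
  | nil => intro prev c; simp [pvLoopA, pvTailForm]
  | cons x xs ih =>
    intro prev c
    have hfx : (pvFieldsB x).getD 0 "" = pvKey x := rfl
    have henum : ∀ (run : List String) (s : Int), PySem.List.enumerate (x :: run) s
        = (s, x) :: PySem.List.enumerate run (s + 1) := by
      intro run s; simp [PySem.List.enumerate]
    by_cases hk : pvKey x = pvKey prev
    · have hcond : ((pvFieldsB x).getD 0 "" == pvKey prev) = true := by
        rw [hfx]; exact beq_iff_eq.mpr hk
      have hcond' : (pvKey prev == pvKey x) = true := beq_iff_eq.mpr hk.symm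
      have hpred : (fun s => (pvFieldsB s).getD 0 "" == pvKey x)
          = (fun s => (pvFieldsB s).getD 0 "" == pvKey prev) := by
        funext s; rw [hk]
      have hih := ih x (c + 1)
      rw [hpred] at hih
      simp only [pvLoopA, hcond', if_pos, List.takeWhile_cons, List.dropWhile_cons, hcond,
        henum, List.map_cons, List.cons_append]
      exact congrArg _ hih
    · have hcondx : ((pvFieldsB x).getD 0 "" == pvKey prev) = false := by
        rw [hfx]; exact beq_eq_false_iff_ne.mpr hk
      have hcond' : (pvKey prev == pvKey x) = false := beq_eq_false_iff_ne.mpr (fun h => hk h.symm)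
      simp only [pvLoopA, hcond', Bool.false_eq_true, if_false, List.takeWhile_cons,
        List.dropWhile_cons, hcondx]
      simp [pvTailForm, PySem.List.enumerate]

theorem pvAlt_eq_tailForm (l : List String) : processDuplicatedName_alt l = pvTailForm l := by
  induction hn : l.length using Nat.strong_induction_on generalizing l with
  | _ n ih =>
    cases l with
    | nil => rw [processDuplicatedName_alt]; rfl
    | cons h t =>
      rw [processDuplicatedName_alt]
      show h :: ((PySem.List.enumerate
          (t.takeWhile (fun s => (pvFieldsB s).getD 0 "" == (pvFieldsB h).getD 0 "")) 1).map pvSuffixB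
          ++ processDuplicatedName_alt
              (t.dropWhile (fun s => (pvFieldsB s).getD 0 "" == (pvFieldsB h).getD 0 ""))) = _
      have hkeyh : (pvFieldsB h).getD 0 "" = pvKey h := rfl
      rw [hkeyh]
      have hrec := ih (t.dropWhile (fun s => (pvFieldsB s).getD 0 "" == pvKey h)).length
        (by subst hn; simp only [List.length_cons]
            exact Nat.lt_succ_of_le (List.dropWhile_sublist _).length_le)
        _ rfl
      rw [hrec]
      show _ = h :: pvLoopA h 0 t
      rw [pvLoopA_split t h 0]
      norm_num

-- ===== VERDICT (by name: the statement is the Claim_ definition above) =====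
theorem processDuplicatedName_spec : Claim_equal_processDuplicatedName := by
  intro l _ _
  unfold Spec_processDuplicatedName
  rw [pvA_eq_tailForm, pvAlt_eq_tailForm]
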